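-- pv_equiv track=rewrite | github.com/methal-project/FETE | sklearn_crfsuite/acts.py | find_heads
-- ===== SOURCE A (Python) =====
-- def find_heads(labels, tag):
--   result = []
--   last_tag = ""
--   for i in range(len(labels)):
--     y = labels[i]
--     if y == tag and last_tag != tag:
--       result.append(i)
--     last_tag = y
--   return result
-- ===== SOURCE B (Python) =====
-- def find_heads(labels, tag):
--     # stage 1: run-length encode labels into (key, length) runs
--     runs = []
--     for y in labels:
--         if runs and runs[-1][0] == y:
--             runs[-1] = (y, runs[-1][1] + 1)
--         else:
--             runs.append((y, 1))
--     # stage 2: scan the runs, keeping a running offset; a run of `tag` starts a head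
--     result = []
--     offset = 0
--     for key, length in runs:
--         if key == tag:
--             result.append(offset)
--         offset += length
--     return result
-- ===== Notes on version B (the rewrite author's own statement) =====
-- stated objective: alternative
-- what changed: Replaces A's single stateful index loop with a last_tag sentinel by a two-stage algorithm: first run-length encode the labels into (key, length) runs, then scan the runs with a running offset, emitting the offset of every run whose key equals tag.
-- intended difference: When tag == '' and labels starts with '', A's '' sentinel for last_tag collides with tag so A omits index 0 (e.g. returns [] on ([''], '')), while B returns the run head [0], which is the intended answer since position 0 genuinely starts a run matching tag. — e.g. on find_heads([""], ""): A returns [], B returns [0]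
import Mathlib
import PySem

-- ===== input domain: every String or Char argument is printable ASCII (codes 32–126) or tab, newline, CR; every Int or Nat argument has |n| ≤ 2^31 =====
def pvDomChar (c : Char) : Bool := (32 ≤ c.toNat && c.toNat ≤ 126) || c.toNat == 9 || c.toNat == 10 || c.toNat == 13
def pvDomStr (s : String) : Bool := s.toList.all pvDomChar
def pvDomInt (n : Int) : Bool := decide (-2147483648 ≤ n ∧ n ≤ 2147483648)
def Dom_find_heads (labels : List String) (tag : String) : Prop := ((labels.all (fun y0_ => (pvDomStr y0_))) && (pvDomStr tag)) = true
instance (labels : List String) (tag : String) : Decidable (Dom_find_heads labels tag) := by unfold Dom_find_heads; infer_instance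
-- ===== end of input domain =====

-- B replaces A's stateful last_tag loop by two stages: run-length encode, then scan runs with an offset (alternative decomposition; A and B differ only when tag = "" and labels starts with "", where B's answer is the intended one).

-- ===== PORT A =====
def find_heads (labels : List String) (tag : String) : List Int :=
  ((PySem.List.pyRange 0 (PySem.List.len labels) 1).foldl
    (fun (st : List Int × String) i =>
      let y := PySem.List.pyGetD labels i ""
      ((if y == tag && !(st.2 == tag) then st.1 ++ [i] else st.1), y))
    ([], "")).1

-- ===== PORT B =====
def find_heads_alt (labels : List String) (tag : String) : List Int :=
  -- stage 1: run-length encode labels into (key, length) runs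
  let runs : List (String × Int) := labels.foldl
    (fun (runs : List (String × Int)) y =>
      match runs.getLast? with
      | some last => if last.1 == y then runs.dropLast ++ [(y, last.2 + 1)] else runs ++ [(y, 1)]
      | none => runs ++ [(y, 1)]) []
  -- stage 2: scan runs with a running offset
  (runs.foldl
    (fun (st : List Int × Int) p =>
      ((if p.1 == tag then st.1 ++ [st.2] else st.1), st.2 + p.2)) ([], 0)).1

-- ===== PRECONDITION & SPEC =====
-- When tag = "" and labels starts with "", A's "" sentinel for last_tag collides with tag, so A omits the run head at index 0; B returns it, which is the intended value.
def D_find_heads (labels : List String) (tag : String) : Prop :=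
  tag = "" ∧ labels.head? = some ""
instance (labels : List String) (tag : String) : Decidable (D_find_heads labels tag) := by unfold D_find_heads; infer_instance
def Spec_find_heads (labels : List String) (tag : String) (out : List Int) : Prop := ¬ D_find_heads labels tag → out = find_heads_alt labels tag
instance (labels : List String) (tag : String) (out : List Int) : Decidable (Spec_find_heads labels tag out) := by unfold Spec_find_heads; infer_instance
def pvDiffWitness_find_heads : List String × String := ([""], "")
def pvDiffWitnessOut_find_heads : (List Int) × (List Int) := ([], [0])

-- ===== CLAIM (what is proved, stated in full; the proofs are below) =====
def Claim_unchanged_find_heads : Prop := ∀ (labels : List String) (tag : String), Dom_find_heads labels tag → Spec_find_heads labels tag (find_heads labels tag)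
def Claim_changed_find_heads : Prop := Dom_find_heads (pvDiffWitness_find_heads.1) (pvDiffWitness_find_heads.2) ∧ D_find_heads (pvDiffWitness_find_heads.1) (pvDiffWitness_find_heads.2) ∧ find_heads (pvDiffWitness_find_heads.1) (pvDiffWitness_find_heads.2) = pvDiffWitnessOut_find_heads.1 ∧ find_heads_alt (pvDiffWitness_find_heads.1) (pvDiffWitness_find_heads.2) = pvDiffWitnessOut_find_heads.2 ∧ pvDiffWitnessOut_find_heads.1 ≠ pvDiffWitnessOut_find_heads.2
def Claim_exact_find_heads : Prop := ∀ (labels : List String) (tag : String), Dom_find_heads labels tag → D_find_heads labels tag → find_heads labels tag ≠ find_heads_alt labels tag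

-- ===== LEMMAS AND PROOFS =====

-- common reference recursion: starts of tag-runs of l from position a, given the previous label `last`
def spec (tag last : String) : List String → Int → List Int
  | [], _ => []
  | y :: ys, a => (if y == tag && !(last == tag) then [a] else []) ++ spec tag y ys (a + 1)

theorem spec_mem_ge (tag last : String) (l : List String) (a : Int) :
    ∀ x ∈ spec tag last l a, a ≤ x := by
  induction l generalizing last a with
  | nil => simp [spec]
  | cons y ys ih =>
    intro x hx
    simp only [spec, List.mem_append] at hx
    rcases hx with h | h
    · split at h <;> simp_all
    · have := ih y (a + 1) x h; omega

theorem find_heads_eq_spec (labels : List String) (tag : String) :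
    find_heads labels tag = spec tag "" labels 0 := by
  unfold find_heads
  have e : ((PySem.List.enumerate labels 0).foldl
      (fun (st : List Int × String) (p : Int × String) =>
        ((if PySem.List.pyGetD labels p.1 "" == tag && !(st.2 == tag)
          then st.1 ++ [p.1] else st.1), PySem.List.pyGetD labels p.1 ""))
      ([], "")) =
      ((PySem.List.pyRange 0 (PySem.List.len labels) 1).foldl
        (fun (st : List Int × String) i =>
          ((if PySem.List.pyGetD labels i "" == tag && !(st.2 == tag)
            then st.1 ++ [i] else st.1), PySem.List.pyGetD labels i ""))
        ([], "")) := by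
    rw [PySem.List.enumerate_eq_map_pyRange labels "", List.foldl_map]
  rw [← e]
  have key : ∀ (l : List String) (s : Int) (acc : List Int) (last : String),
      (∀ p ∈ PySem.List.enumerate l s, PySem.List.pyGetD labels p.1 "" = p.2) →
      ((PySem.List.enumerate l s).foldl
        (fun (st : List Int × String) (p : Int × String) =>
          ((if PySem.List.pyGetD labels p.1 "" == tag && !(st.2 == tag)
            then st.1 ++ [p.1] else st.1), PySem.List.pyGetD labels p.1 ""))
        (acc, last)).1 = acc ++ spec tag last l s := by
    intro l
    induction l with
    | nil => intro s acc last _; simp [PySem.List.enumerate, spec]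
    | cons y ys ih =>
      intro s acc last hget
      rw [PySem.List.enumerate_cons] at hget ⊢
      have hy : PySem.List.pyGetD labels s "" = y := hget (s, y) (by simp)
      simp only [List.foldl_cons, hy]
      rw [ih (s + 1) _ y (fun p hp => hget p (by simp [hp]))]
      simp only [spec]
      split <;> simp
  have hget0 : ∀ p ∈ PySem.List.enumerate labels 0, PySem.List.pyGetD labels p.1 "" = p.2 := by
    intro p hp
    rw [PySem.List.mem_enumerate_iff] at hp
    obtain ⟨k, hk, rfl⟩ := hp
    simp [PySem.List.pyGetD_natCast, hk]
  rw [key labels 0 [] "" hget0]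
  simp

-- reference run-length encoding: continue a current run of `k` already of length `c`
def rleCont (k : String) (c : Int) : List String → List (String × Int)
  | [] => [(k, c)]
  | y :: ys => if k == y then rleCont k (c + 1) ys else (k, c) :: rleCont y 1 ys

-- B's stage-1 foldl, started with an accumulator ending in (k, c), computes rleCont
theorem stage1_eq_rleCont (l : List String) :
    ∀ (R : List (String × Int)) (k : String) (c : Int),
    l.foldl
      (fun (runs : List (String × Int)) y =>
        match runs.getLast? with
        | some last => if last.1 == y then runs.dropLast ++ [(y, last.2 + 1)] else runs ++ [(y, 1)]
        | none => runs ++ [(y, 1)]) (R ++ [(k, c)])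
    = R ++ rleCont k c l := by
  induction l with
  | nil => intro R k c; simp [rleCont]
  | cons y ys ih =>
    intro R k c
    simp only [List.foldl_cons, List.getLast?_concat, List.dropLast_concat, rleCont]
    by_cases hk : (k == y) = true
    · have hky : k = y := by simpa using hk
      subst hky
      simp only [hk, if_true]
      exact ih R k (c + 1)
    · simp only [hk, if_false, Bool.false_eq_true]
      rw [show R ++ [(k, c)] ++ [(y, 1)] = (R ++ [(k, c)]) ++ [(y, 1)] by simp,
        ih (R ++ [(k, c)]) y 1]
      simp

-- B's stage-2 foldl over rleCont-runs computes the run heads, i.e. spec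
theorem stage2_rleCont (tag : String) (l : List String) :
    ∀ (k : String) (c off : Int) (acc : List Int),
    ((rleCont k c l).foldl
      (fun (st : List Int × Int) p =>
        ((if p.1 == tag then st.1 ++ [st.2] else st.1), st.2 + p.2)) (acc, off)).1
    = acc ++ (if k == tag then [off] else []) ++ spec tag k l (off + c) := by
  induction l with
  | nil => intro k c off acc; simp [rleCont, spec]; split <;> simp
  | cons z zs ih =>
    intro k c off acc
    simp only [rleCont]
    by_cases hk : (k == z) = true
    · have hkz : k = z := by simpa using hk
      subst hkz
      simp only [hk, if_true]
      rw [ih k (c + 1) off acc]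
      simp only [spec]
      have : (k == tag && !(k == tag)) = false := by cases h : (k == tag) <;> simp
      rw [this]
      simp only [if_false, List.nil_append, Bool.false_eq_true]
      rw [show off + (c + 1) = off + c + 1 by omega]
    · simp only [hk, if_false, Bool.false_eq_true, List.foldl_cons]
      rw [ih z 1 (off + c) (if k == tag then acc ++ [off] else acc)]
      simp only [spec]
      have hne : k ≠ z := by simpa using hk
      have hcond : (z == tag && !(k == tag)) = (z == tag) := by
        by_cases hz : z = tag
        · subst hz
          have : (k == z) = false := by simpa using hne
          simp [this]
        · have : (z == tag) = false := by simpa using hz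
          simp [this]
      rw [hcond]
      split <;> split <;> simp

theorem find_heads_alt_eq (labels : List String) (tag : String) :
    find_heads_alt labels tag =
      (match labels with
       | [] => []
       | y :: ys => (if y == tag then [(0 : Int)] else []) ++ spec tag y ys 1) := by
  match labels with
  | [] => simp [find_heads_alt]
  | y :: ys =>
    unfold find_heads_alt
    simp only [List.foldl_cons, List.getLast?_nil, List.nil_append]
    rw [show ([(y, (1 : Int))] : List (String × Int)) = [] ++ [(y, 1)] by simp,
      stage1_eq_rleCont ys [] y 1]
    simp only [List.nil_append]
    rw [stage2_rleCont tag ys y 1 0 []]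
    simp

-- ===== VERDICT (by name: the statement is the Claim_ definition above) =====
theorem find_heads_spec : Claim_unchanged_find_heads := by
  intro labels tag _ hD
  rw [find_heads_eq_spec, find_heads_alt_eq]
  match labels with
  | [] => simp [spec]
  | y :: ys =>
    unfold D_find_heads at hD
    simp only [List.head?_cons] at hD
    rw [spec]
    by_cases hy : y = tag
    · subst hy
      have hne : ¬ (y = "") := fun h => hD ⟨h, by rw [h]⟩
      have : ("" == y) = false := by
        rw [beq_eq_false_iff_ne]; exact fun h => hne h.symm
      simp [this]
    · simp [hy]

theorem find_heads_changed : Claim_changed_find_heads := by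
  unfold Claim_changed_find_heads; decide

theorem find_heads_tight : Claim_exact_find_heads := by
  intro labels tag _ hD
  obtain ⟨htag, hhead⟩ := hD
  match labels with
  | [] => simp at hhead
  | y :: ys =>
    simp only [List.head?_cons, Option.some.injEq] at hhead
    subst htag; subst hhead
    rw [find_heads_eq_spec, find_heads_alt_eq]
    have ha : spec "" "" ("" :: ys) 0 = spec "" "" ys 1 := by
      simp [spec]
    rw [ha]
    simp only [beq_self_eq_true]
    intro h
    have h0 : (0 : Int) ∈ spec "" "" ys 1 := by
      rw [h]; simp
    have := spec_mem_ge "" "" ys 1 0 h0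
    omega
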